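-- pv_equiv track=rewrite | github.com/pawanbudati/Regular-projects | new.py | devideAndRule
-- ===== SOURCE A (Python) =====
-- def devideAndRule(input1,n):
--     for i in range(1,n-1):
--         sum = 0
--         for j in range(i):
--             sum += input1[j]
--         sum2 = 0
--         for k in range(i+1,n):
--             sum2 += input1[k]
--         if sum==sum2:
--             return i
--     else:
--         return 0
-- ===== SOURCE B (Python) =====
-- def devideAndRule(input1, n):
--     total = sum(input1[:n])
--     prefix = 0
--     for i in range(1, n - 1):
--         prefix += input1[i - 1]
--         if 2 * prefix == total - input1[i]:
--             return i
--     return 0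
-- ===== Notes on version B (the rewrite author's own statement) =====
-- stated objective: faster
-- what changed: Replaced the per-split recomputation of prefix and suffix sums (two inner loops per candidate i) by one precomputed total and a running prefix sum checked in a single pass.
import Mathlib
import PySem

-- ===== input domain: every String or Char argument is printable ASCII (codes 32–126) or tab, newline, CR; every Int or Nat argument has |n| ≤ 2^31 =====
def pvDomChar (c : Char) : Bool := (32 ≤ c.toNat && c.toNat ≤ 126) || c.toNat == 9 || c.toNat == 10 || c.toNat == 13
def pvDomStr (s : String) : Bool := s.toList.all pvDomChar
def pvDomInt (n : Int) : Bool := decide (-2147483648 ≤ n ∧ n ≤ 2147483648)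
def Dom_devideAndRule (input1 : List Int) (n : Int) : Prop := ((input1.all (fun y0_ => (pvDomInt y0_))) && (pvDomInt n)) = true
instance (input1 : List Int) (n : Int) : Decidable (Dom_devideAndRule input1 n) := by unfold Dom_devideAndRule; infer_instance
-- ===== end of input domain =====

-- B replaces A's per-split recomputation of both sums (O(n^2)) with a precomputed total
-- and a running prefix sum in one pass (O(n)); same first-match result.

-- ===== PORT A =====
-- the for-loop with early return, one step per candidate i
def devideAndRuleLoop (input1 : List Int) (n : Int) : List Int → Int
  | [] => 0
  | i :: rest =>
    let sum := (PySem.List.pyRange 0 i 1).foldl (fun s j => s + PySem.List.pyGetD input1 j 0) 0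
    let sum2 := (PySem.List.pyRange (i+1) n 1).foldl (fun s k => s + PySem.List.pyGetD input1 k 0) 0
    if sum = sum2 then i else devideAndRuleLoop input1 n rest

def devideAndRule (input1 : List Int) (n : Int) : Int :=
  devideAndRuleLoop input1 n (PySem.List.pyRange 1 (n-1) 1)

-- ===== PORT B =====
-- B's loop: carries the running prefix sum
def devideAndRuleAltLoop (input1 : List Int) (total : Int) : Int → List Int → Int
  | _, [] => 0
  | pfx, i :: rest =>
    let pfx' := pfx + PySem.List.pyGetD input1 (i-1) 0
    if 2 * pfx' = total - PySem.List.pyGetD input1 i 0 then i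
    else devideAndRuleAltLoop input1 total pfx' rest

def devideAndRule_alt (input1 : List Int) (n : Int) : Int :=
  let total := (PySem.List.slice input1 none (some n)).sum
  devideAndRuleAltLoop input1 total 0 (PySem.List.pyRange 1 (n-1) 1)

-- ===== PRECONDITION & SPEC =====
-- Pre_ excludes exactly the inputs where A raises IndexError: n ≥ 3 with fewer than n elements.
def Pre_devideAndRule (input1 : List Int) (n : Int) : Prop :=
  n ≤ (input1.length : Int) ∨ n ≤ 2
instance (input1 : List Int) (n : Int) : Decidable (Pre_devideAndRule input1 n) := by
  unfold Pre_devideAndRule; infer_instance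

def pvWitness_devideAndRule : List Int × Int := ([1, 2, 3, 2, 1], 5)

def Spec_devideAndRule (input1 : List Int) (n : Int) (out : Int) : Prop := out = devideAndRule_alt input1 n
instance (input1 : List Int) (n : Int) (out : Int) : Decidable (Spec_devideAndRule input1 n out) := by unfold Spec_devideAndRule; infer_instance

-- ===== CLAIM (what is proved, stated in full; the proofs are below) =====
def Claim_equal_devideAndRule : Prop := ∀ (input1 : List Int) (n : Int), Dom_devideAndRule input1 n → Pre_devideAndRule input1 n → Spec_devideAndRule input1 n (devideAndRule input1 n)

-- ===== LEMMAS AND PROOFS =====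

-- sum of input1 over indices [a, b)
def sumR (input1 : List Int) (a b : Int) : Int :=
  ((PySem.List.pyRange a b 1).map (fun j => PySem.List.pyGetD input1 j 0)).sum

theorem sumR_split (input1 : List Int) (a m b : Int) (h1 : a ≤ m) (h2 : m ≤ b) :
    sumR input1 a b = sumR input1 a m + sumR input1 m b := by
  unfold sumR
  rw [PySem.List.pyRange_one_append a m b h1 h2, List.map_append, List.sum_append]

theorem sumR_single (input1 : List Int) (i : Int) :
    sumR input1 i (i+1) = PySem.List.pyGetD input1 i 0 := by
  unfold sumR
  rw [PySem.List.pyRange_one_singleton]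
  simp

theorem foldl_eq_sumR (input1 : List Int) (a b : Int) :
    (PySem.List.pyRange a b 1).foldl (fun s j => s + PySem.List.pyGetD input1 j 0) 0
      = sumR input1 a b := by
  unfold sumR
  rw [PySem.List.foldl_add]
  ring

theorem total_eq_sumR (input1 : List Int) (n : Int) (h0 : 0 ≤ n) (hn : n ≤ (input1.length : Int)) :
    (PySem.List.slice input1 none (some n)).sum = sumR input1 0 n := by
  unfold sumR
  rw [PySem.List.slice_to input1 h0]
  congr 1
  apply List.ext_getElem
  · simp [PySem.List.length_pyRange_one]
    omega
  · intro k hk1 hk2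
    have hklen : k < input1.length := by
      simp at hk1; omega
    have hkn : (k : Int) < n := by
      simp [PySem.List.length_pyRange_one] at hk2; omega
    simp [PySem.List.getElem_pyRange_one, List.getElem?_eq_getElem hklen]

theorem loop_eq (input1 : List Int) (n : Int) :
    ∀ (k : Nat) (i : Int), 1 ≤ i → (n - 1 - i).toNat = k →
      devideAndRuleLoop input1 n (PySem.List.pyRange i (n-1) 1)
        = devideAndRuleAltLoop input1 (sumR input1 0 n) (sumR input1 0 (i-1))
            (PySem.List.pyRange i (n-1) 1) := by
  intro k
  induction k with
  | zero =>
    intro i hi hz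
    have : n - 1 ≤ i := by omega
    rw [PySem.List.pyRange_one_eq_nil this]
    rfl
  | succ k ih =>
    intro i hi hk
    have hib : i < n - 1 := by omega
    rw [PySem.List.pyRange_one_cons hib]
    show (if _ = _ then i else devideAndRuleLoop input1 n (PySem.List.pyRange (i+1) (n-1) 1))
        = (if _ = _ then i else devideAndRuleAltLoop input1 _ _ (PySem.List.pyRange (i+1) (n-1) 1))
    have hpfx : sumR input1 0 (i-1) + PySem.List.pyGetD input1 (i-1) 0 = sumR input1 0 i := by
      have := sumR_split input1 0 (i-1) i (by omega) (by omega)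
      have hs := sumR_single input1 (i-1)
      have : sumR input1 0 i = sumR input1 0 (i-1) + sumR input1 (i-1) (i-1+1) := by
        simpa using sumR_split input1 0 (i-1) i (by omega) (by omega)
      rw [this, hs]
    have htot : sumR input1 0 n = sumR input1 0 i + PySem.List.pyGetD input1 i 0 + sumR input1 (i+1) n := by
      have h1 : sumR input1 0 n = sumR input1 0 i + sumR input1 i n :=
        sumR_split input1 0 i n (by omega) (by omega)
      have h2 : sumR input1 i n = sumR input1 i (i+1) + sumR input1 (i+1) n :=
        sumR_split input1 i (i+1) n (by omega) (by omega)
      rw [h1, h2, sumR_single]; ring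
    rw [foldl_eq_sumR, foldl_eq_sumR, hpfx]
    have hcond : (sumR input1 0 i = sumR input1 (i+1) n)
        ↔ (2 * sumR input1 0 i = sumR input1 0 n - PySem.List.pyGetD input1 i 0) := by
      constructor <;> intro h <;> omega
    by_cases hc : sumR input1 0 i = sumR input1 (i+1) n
    · rw [if_pos hc, if_pos (hcond.mp hc)]
    · rw [if_neg hc, if_neg (fun h => hc (hcond.mpr h))]
      have := ih (i+1) (by omega) (by omega)
      simpa using this

-- ===== VERDICT (by name: the statement is the Claim_ definition above) =====
theorem devideAndRule_spec : Claim_equal_devideAndRule := by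
  intro input1 n _ hpre
  unfold Spec_devideAndRule devideAndRule devideAndRule_alt
  by_cases hsmall : n ≤ 2
  · rw [PySem.List.pyRange_one_eq_nil (by omega : n - 1 ≤ 1)]
    rfl
  · have h3 : 3 ≤ n := by omega
    have hn : n ≤ (input1.length : Int) := by
      rcases hpre with h | h
      · exact h
      · omega
    rw [total_eq_sumR input1 n (by omega) hn]
    have := loop_eq input1 n (n - 1 - 1).toNat 1 le_rfl rfl
    simpa using this
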